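-- pv_equiv track=rewrite | github.com/l1ghtny/mini-app-tg-gpt | app/api/images.py | _is_allowed_proxy_host
-- ===== SOURCE A (Python) =====
-- def _is_allowed_proxy_host(host: str, allowed_hosts: set[str]) -> bool:
--     normalized = host.strip().lower().strip(".")
--     if not normalized:
--         return False
--
--     for candidate in allowed_hosts:
--         candidate = candidate.strip().lower().strip(".")
--         if not candidate:
--             continue
--         if candidate.startswith("*."):
--             suffix = candidate[1:]  # ".example.com"
--             if normalized.endswith(suffix) and normalized != suffix.lstrip("."):
--                 return True
--             continue
--         if normalized == candidate:
--             return True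
--
--     return False
-- ===== SOURCE B (Python) =====
-- def _is_allowed_proxy_host(host: str, allowed_hosts: set[str]) -> bool:
--     normalized = host.strip().lower().strip(".")
--     if not normalized:
--         return False
--
--     patterns = {c.strip().lower().strip(".") for c in allowed_hosts}
--     if normalized in patterns:
--         return True
--     # wildcard match: '*.suffix' matches any host ending in '.suffix';
--     # enumerate the host's own dot-suffixes and look each pattern up.
--     return any("*" + normalized[i:] in patterns
--                for i in range(len(normalized)) if normalized[i] == ".")
-- ===== Notes on version B (the rewrite author's own statement) =====
-- stated objective: alternative
-- what changed: A scans allowed_hosts and tests each normalized candidate against the host (endswith plus a '!=' guard for wildcards); B instead builds the set of normalized patterns once and then enumerates the HOST's own dot-suffix positions, looking '*' + suffix up in that set (the '!=' guard is provably redundant), so the per-candidate endswith scan disappears.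
import Mathlib
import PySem

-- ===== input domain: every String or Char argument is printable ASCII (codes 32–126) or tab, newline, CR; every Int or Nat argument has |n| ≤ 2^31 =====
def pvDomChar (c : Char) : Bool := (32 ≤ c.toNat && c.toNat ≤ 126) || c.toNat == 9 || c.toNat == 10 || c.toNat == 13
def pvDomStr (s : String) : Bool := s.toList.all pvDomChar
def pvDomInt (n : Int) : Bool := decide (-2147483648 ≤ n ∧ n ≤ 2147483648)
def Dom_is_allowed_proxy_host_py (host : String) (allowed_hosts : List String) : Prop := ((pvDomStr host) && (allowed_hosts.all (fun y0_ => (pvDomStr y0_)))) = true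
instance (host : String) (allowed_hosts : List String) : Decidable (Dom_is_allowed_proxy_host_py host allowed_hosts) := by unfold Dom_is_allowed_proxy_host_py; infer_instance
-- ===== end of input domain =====

-- B replaces A's per-candidate endswith scan by a different algorithm: build the set of
-- normalized patterns once, then enumerate the HOST's own dot-suffixes and look each
-- '*'+suffix up in that set (A's '!=' guard is provably redundant); objective: alternative.

-- shared normalization: s.strip().lower().strip(".")
def pvNorm (s : String) : String :=
  PySem.Str.stripChars (PySem.Str.lower (PySem.Str.strip s)) "."

-- hand port of s.lstrip("."): drop leading '.' characters (exact: lstrip with a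
-- char set removes exactly the leading characters belonging to the set)
def pvLstripDot (s : String) : String :=
  String.ofList (s.toList.dropWhile (fun c => c == '.'))

-- ===== PORT A =====
def pvALoop (normalized : String) : List String → Bool
  | [] => false
  | c :: rest =>
    let cand := pvNorm c
    if cand = "" then pvALoop normalized rest
    else if PySem.Str.startswith cand "*." then
      let suffix := PySem.Str.slice cand (some 1) none
      if PySem.Str.endswith normalized suffix && normalized ≠ pvLstripDot suffix then true
      else pvALoop normalized rest
    else if normalized = cand then true
    else pvALoop normalized rest

def is_allowed_proxy_host_py (host : String) (allowed_hosts : List String) : Bool :=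
  let normalized := pvNorm host
  if normalized = "" then false
  else pvALoop normalized allowed_hosts

-- ===== PORT B =====
-- Source B: patterns = {normalize(c) for c in allowed_hosts}; exact lookup; then for each
-- index i with normalized[i] == '.', look up "*" + normalized[i:] in the set.
-- ("*" + normalized[i:] is built as String.ofList ('*' :: …): exact for Python's str +.)
def is_allowed_proxy_host_py_alt (host : String) (allowed_hosts : List String) : Bool :=
  let normalized := pvNorm host
  if normalized = "" then false
  else
    let patterns : PySem.Set String := PySem.Set.ofList (allowed_hosts.map pvNorm)
    if PySem.Set.contains patterns normalized then true
    else
      (PySem.List.pyRange 0 (PySem.Str.len normalized) 1).any (fun i =>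
        (PySem.Str.pyGet? normalized i == some '.') &&
        PySem.Set.contains patterns
          (String.ofList ('*' :: (PySem.Str.slice normalized (some i) none).toList)))

-- ===== PRECONDITION & SPEC =====
def Spec_is_allowed_proxy_host_py (host : String) (allowed_hosts : List String) (out : Bool) : Prop := out = is_allowed_proxy_host_py_alt host allowed_hosts
instance (host : String) (allowed_hosts : List String) (out : Bool) : Decidable (Spec_is_allowed_proxy_host_py host allowed_hosts out) := by unfold Spec_is_allowed_proxy_host_py; infer_instance

-- ===== CLAIM (what is proved, stated in full; the proofs are below) =====
def Claim_equal_is_allowed_proxy_host_py : Prop := ∀ (host : String) (allowed_hosts : List String), Dom_is_allowed_proxy_host_py host allowed_hosts → Spec_is_allowed_proxy_host_py host allowed_hosts (is_allowed_proxy_host_py host allowed_hosts)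

-- ===== LEMMAS AND PROOFS =====

-- A's per-candidate test, named
def pvAHit (n cand : String) : Bool :=
  if cand = "" then false
  else if PySem.Str.startswith cand "*." then
    PySem.Str.endswith n (PySem.Str.slice cand (some 1) none)
      && n ≠ pvLstripDot (PySem.Str.slice cand (some 1) none)
  else decide (n = cand)

theorem pvALoop_eq_any (n : String) (l : List String) :
    pvALoop n l = l.any (fun c => pvAHit n (pvNorm c)) := by
  induction l with
  | nil => rfl
  | cons c rest ih =>
    show (if pvNorm c = "" then pvALoop n rest
      else if PySem.Str.startswith (pvNorm c) "*." then
        if PySem.Str.endswith n (PySem.Str.slice (pvNorm c) (some 1) none)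
            && n ≠ pvLstripDot (PySem.Str.slice (pvNorm c) (some 1) none) then true
        else pvALoop n rest
      else if n = pvNorm c then true else pvALoop n rest)
      = (pvAHit n (pvNorm c) || rest.any (fun c => pvAHit n (pvNorm c)))
    rw [← ih]
    unfold pvAHit
    split_ifs with h1 h2 h3 h4
    · rw [Bool.false_or]
    · rw [h3, Bool.true_or]
    · rw [Bool.not_eq_true] at h3
      rw [h3, Bool.false_or]
    · rw [decide_eq_true h4, Bool.true_or]
    · rw [decide_eq_false h4, Bool.false_or]

-- B's per-pattern shape: n equals the pattern, or the pattern is '*' followed by a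
-- dot-suffix of n
def pvBHitP (n x : List Char) : Prop :=
  n = x ∨ ∃ j : Nat, j < n.length ∧ n[j]? = some '.' ∧ x = '*' :: n.drop j

theorem pvLstrip_toList (s : String) :
    (pvLstripDot s).toList = s.toList.dropWhile (fun c => c == '.') := by
  simp [pvLstripDot]

theorem pvSlice1_toList (s : String) :
    (PySem.Str.slice s (some 1) none).toList = s.toList.drop 1 := by
  simp [PySem.List.slice_from_one, List.drop_one]

-- a dot-headed suffix of n is strictly shorter than n after lstrip('.'), so n never
-- equals it (A's '!=' guard is redundant)
theorem pvNe_of_suffix (n r : List Char) (h : ('.'::r) <:+ n) :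
    n ≠ ('.'::r).dropWhile (fun c => c == '.') := by
  intro hEq
  have h1 : (('.'::r).dropWhile (fun c => c == '.')) = r.dropWhile (fun c => c == '.') := by
    simp
  rw [h1] at hEq
  have h2 := List.length_dropWhile_le (fun c => c == '.') r
  have h3 := List.IsSuffix.length_le h
  have h4 := congrArg List.length hEq
  simp only [List.length_cons] at h3
  omega

theorem pvDropDot (n : List Char) (j : Nat) (hdot : n[j]? = some '.') :
    n.drop j = '.' :: n.drop (j+1) := by
  have h : (n.drop j).head? = some '.' := by rw [List.head?_drop]; exact hdot
  cases hdd : n.drop j with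
  | nil => rw [hdd] at h; cases h
  | cons a tl =>
    rw [hdd] at h
    injection h with h
    subst h
    have ht : (n.drop j).tail = n.drop (j+1) := List.tail_drop
    rw [hdd] at ht
    simpa using congrArg (List.cons '.') ht

-- the pointwise fact: A's test on a pattern accepts exactly B's membership shape
theorem pvHit_iff (n x : String) (hn : n.toList ≠ []) :
    pvAHit n x = true ↔ pvBHitP n.toList x.toList := by
  unfold pvAHit pvBHitP
  by_cases h1 : x = ""
  · subst h1
    rw [if_pos rfl]
    simp only [Bool.false_eq_true, false_iff]
    rintro (h | ⟨j, hj, hdot, hx⟩)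
    · exact hn (by rw [h]; rfl)
    · exact absurd hx (by simp)
  · rw [if_neg h1]
    by_cases h2 : PySem.Str.startswith x "*." = true
    · rw [if_pos h2]
      obtain ⟨t, ht⟩ : ∃ t, ['*','.'] ++ t = x.toList := by
        have h2' : PySem.Chars.startswith x.toList ['*','.'] = true := by
          simpa using h2
        exact (PySem.Chars.startswith_iff _ _).mp h2'
      have hx1 : x.toList.drop 1 = '.'::t := by rw [← ht]; rfl
      constructor
      · intro hA
        simp only [Bool.and_eq_true, decide_eq_true_eq] at hA
        obtain ⟨hend, _⟩ := hA
        have hsuf : x.toList.drop 1 <:+ n.toList := by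
          have h' : PySem.Chars.endswith n.toList (PySem.Str.slice x (some 1) none).toList = true := by
            simpa using hend
          have := (PySem.Chars.endswith_iff _ _).mp h'
          rwa [pvSlice1_toList] at this
        rw [hx1] at hsuf
        obtain ⟨pre, hpre⟩ := hsuf
        right
        refine ⟨pre.length, ?_, ?_, ?_⟩
        · rw [← hpre]; simp
        · rw [← hpre]; simp
        · rw [← ht]
          have : n.toList.drop pre.length = '.'::t := by rw [← hpre]; simp
          rw [this]
          rfl
      · intro hB
        have hkey : ∃ r, x.toList.drop 1 = '.'::r ∧ ('.'::r) <:+ n.toList := by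
          rcases hB with hEq | ⟨j, hj, hdot, hx⟩
          · refine ⟨t, hx1, ?_⟩
            rw [hEq, ← hx1]
            exact List.drop_suffix 1 x.toList
          · refine ⟨n.toList.drop (j+1), ?_, ?_⟩
            · rw [hx]
              simpa [List.drop_one] using pvDropDot n.toList j hdot
            · rw [← pvDropDot n.toList j hdot]
              exact List.drop_suffix j n.toList
        obtain ⟨r, hr1, hr2⟩ := hkey
        simp only [Bool.and_eq_true, decide_eq_true_eq]
        constructor
        · have : PySem.Chars.endswith n.toList (PySem.Str.slice x (some 1) none).toList = true := by
            apply (PySem.Chars.endswith_iff _ _).mpr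
            rw [pvSlice1_toList, hr1]
            exact hr2
          simpa using this
        · intro hEq
          apply pvNe_of_suffix n.toList r hr2
          have := congrArg String.toList hEq
          rwa [pvLstrip_toList, pvSlice1_toList, hr1] at this
    · rw [if_neg h2]
      simp only [decide_eq_true_eq]
      constructor
      · intro h
        exact Or.inl (congrArg String.toList h)
      · rintro (hEq | ⟨j, hj, hdot, hx⟩)
        · exact String.toList_inj.mp hEq
        · exfalso
          apply h2
          have h2' : PySem.Chars.startswith x.toList ['*','.'] = true := by
            apply (PySem.Chars.startswith_iff _ _).mpr
            refine ⟨n.toList.drop (j+1), ?_⟩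
            rw [hx, pvDropDot n.toList j hdot]
            rfl
          simpa using h2'

-- ===== VERDICT (by name: the statement is the Claim_ definition above) =====
theorem is_allowed_proxy_host_py_spec : Claim_equal_is_allowed_proxy_host_py := by
  intro host hosts _
  unfold Spec_is_allowed_proxy_host_py is_allowed_proxy_host_py is_allowed_proxy_host_py_alt
  by_cases hn : pvNorm host = ""
  · simp [hn]
  · have hn' : (pvNorm host).toList ≠ [] := by
      intro h
      exact hn (String.toList_inj.mp (by rw [h]; rfl))
    show (if pvNorm host = "" then false else pvALoop (pvNorm host) hosts)
        = (if pvNorm host = "" then false else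
            if PySem.Set.contains (PySem.Set.ofList (hosts.map pvNorm)) (pvNorm host) then true
            else (PySem.List.pyRange 0 (PySem.Str.len (pvNorm host)) 1).any (fun i =>
              (PySem.Str.pyGet? (pvNorm host) i == some '.') &&
              PySem.Set.contains (PySem.Set.ofList (hosts.map pvNorm))
                (String.ofList ('*' :: (PySem.Str.slice (pvNorm host) (some i) none).toList))))
    rw [if_neg hn, if_neg hn]
    set n := pvNorm host with hndef
    rw [Bool.eq_iff_iff]
    have hL : pvALoop n hosts = true ↔ ∃ c ∈ hosts, pvBHitP n.toList (pvNorm c).toList := by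
      rw [pvALoop_eq_any, List.any_eq_true]
      constructor
      · rintro ⟨c, hc, h⟩; exact ⟨c, hc, (pvHit_iff n (pvNorm c) hn').mp h⟩
      · rintro ⟨c, hc, h⟩; exact ⟨c, hc, (pvHit_iff n (pvNorm c) hn').mpr h⟩
    rw [hL]
    have hmem : ∀ y : String, PySem.Set.contains (PySem.Set.ofList (hosts.map pvNorm)) y = true
        ↔ ∃ c ∈ hosts, pvNorm c = y := by
      intro y
      rw [PySem.Set.contains_iff, PySem.Set.mem_ofList, List.mem_map]
    by_cases hx : PySem.Set.contains (PySem.Set.ofList (hosts.map pvNorm)) n = true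
    · rw [if_pos hx]
      obtain ⟨c, hc, hcn⟩ := (hmem n).mp hx
      exact iff_of_true ⟨c, hc, Or.inl (congrArg String.toList hcn.symm)⟩ rfl
    · rw [if_neg hx, List.any_eq_true]
      have hnoex : ∀ c ∈ hosts, pvNorm c ≠ n := by
        intro c hc h
        exact hx ((hmem n).mpr ⟨c, hc, h⟩)
      constructor
      · rintro ⟨c, hc, hB⟩
        rcases hB with hEq | ⟨j, hj, hdot, hxx⟩
        · exact absurd (String.toList_inj.mp hEq.symm) (hnoex c hc)
        · refine ⟨(j : Int), ?_, ?_⟩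
          · rw [PySem.List.mem_pyRange_one]
            simp only [PySem.Str.len_eq]
            omega
          · simp only [Bool.and_eq_true, beq_iff_eq]
            refine ⟨?_, ?_⟩
            · rw [PySem.Str.pyGet?_natCast]; exact hdot
            · apply (hmem _).mpr
              refine ⟨c, hc, ?_⟩
              apply String.toList_inj.mp
              rw [String.toList_ofList]
              have hsl : (PySem.Str.slice n (some ((j : Nat) : Int)) none).toList
                  = n.toList.drop j := by
                simp [PySem.List.slice_from_natCast]
              rw [hsl, hxx]
      · rintro ⟨i, hi, h⟩
        rw [PySem.List.mem_pyRange_one] at hi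
        simp only [Bool.and_eq_true, beq_iff_eq] at h
        obtain ⟨hdot, hpat⟩ := h
        obtain ⟨c, hc, hcp⟩ := (hmem _).mp hpat
        have hij : i = ((i.toNat : Nat) : Int) := by omega
        have hjlt : i.toNat < n.toList.length := by
          have h2 := hi.2
          simp only [PySem.Str.len_eq] at h2
          omega
        refine ⟨c, hc, Or.inr ⟨i.toNat, hjlt, ?_, ?_⟩⟩
        · rw [hij, PySem.Str.pyGet?_natCast] at hdot
          exact hdot
        · have hsl : (PySem.Str.slice n (some i) none).toList = n.toList.drop i.toNat := by
            have hb : PySem.List.slice n.toList (some i) none = n.toList.drop i.toNat := by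
              exact PySem.List.slice_from _ hi.1
            simpa using hb
          have h3 := congrArg String.toList hcp
          rw [String.toList_ofList, hsl] at h3
          exact h3
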